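-- pv_equiv track=rewrite | github.com/SAG145/Project-Euler | PEP287 - Quadtree Encoding (a Simple Compression Algorithm).py | min_seq_len
-- ===== SOURCE A (Python) =====
-- def black_or_white(x,y,N,powers):
--     return (x - powers[N - 1])**2 + (y - powers[N - 1])**2 <= powers[2*N - 2]
--
-- def min_seq_len(x,y,d,N,powers):
--     b = black_or_white(x,y,N,powers)
--     if b == black_or_white(x + d,y + d,N,powers) and d != powers[N] - 1:
--         if b == black_or_white(x + d,y,N,powers):
--             if b == black_or_white(x,y + d,N,powers):
--                 return 2
--     e = d // 2
--     return 1 + min_seq_len(x,y,e,N,powers) + min_seq_len(x + e + 1,y + e + 1,e,N,powers) + min_seq_len(x,y + e + 1,e,N,powers) + min_seq_len(x + e + 1,y,e,N,powers)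
-- ===== SOURCE B (Python) =====
-- def black_or_white(x,y,N,powers):
--     return (x - powers[N - 1])**2 + (y - powers[N - 1])**2 <= powers[2*N - 2]
--
-- def min_seq_len(x, y, d, N, powers):
--     total = 0
--     stack = [(x, y, d)]
--     while stack:
--         cx, cy, cd = stack.pop()
--         b = black_or_white(cx, cy, N, powers)
--         if (b == black_or_white(cx + cd, cy + cd, N, powers)
--                 and cd != powers[N] - 1
--                 and b == black_or_white(cx + cd, cy, N, powers)
--                 and b == black_or_white(cx, cy + cd, N, powers)):
--             total += 2
--         else:
--             e = cd // 2
--             total += 1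
--             # pushed so that they are popped in A's recursion order
--             stack.append((cx + e + 1, cy, e))
--             stack.append((cx, cy + e + 1, e))
--             stack.append((cx + e + 1, cy + e + 1, e))
--             stack.append((cx, cy, e))
--     return total
-- ===== Notes on version B (the rewrite author's own statement) =====
-- stated objective: alternative
-- what changed: Replaces the four-way recursion over sub-blocks by an iterative worklist: an explicit stack of pending blocks and a running total, popping one block per iteration.
-- outside the precondition, e.g. on min_seq_len(3, 1, -5, -1, [-2, 6, 7, 10, -4, 7]): A returns 30, B returns 30
import Mathlib
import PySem

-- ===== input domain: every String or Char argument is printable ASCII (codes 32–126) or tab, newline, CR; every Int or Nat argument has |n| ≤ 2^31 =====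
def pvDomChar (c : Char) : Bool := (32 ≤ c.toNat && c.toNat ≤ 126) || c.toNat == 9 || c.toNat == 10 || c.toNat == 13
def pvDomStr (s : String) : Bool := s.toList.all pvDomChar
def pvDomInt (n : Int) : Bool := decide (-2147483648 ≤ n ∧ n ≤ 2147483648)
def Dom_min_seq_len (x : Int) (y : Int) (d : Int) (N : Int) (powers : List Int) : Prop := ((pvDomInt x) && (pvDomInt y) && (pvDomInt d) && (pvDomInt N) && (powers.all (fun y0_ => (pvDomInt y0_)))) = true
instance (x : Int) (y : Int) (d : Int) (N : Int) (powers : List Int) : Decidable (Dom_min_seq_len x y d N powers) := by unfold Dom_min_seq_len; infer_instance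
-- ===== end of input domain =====

-- B replaces A's four-way recursion by an explicit worklist (stack of pending blocks
-- plus a running total); equal return values are proved on Pre_ below.

-- ===== PORT A =====
-- powers[i] with Python index semantics; Pre_ keeps every used index in range,
-- so the .getD 0 default is never the value used.
def pvPw (powers : List Int) (i : Int) : Int := (PySem.List.pyGet? powers i).getD 0

def pvBW (x : Int) (y : Int) (N : Int) (powers : List Int) : Bool :=
  decide ((x - pvPw powers (N - 1)) ^ 2 + (y - pvPw powers (N - 1)) ^ 2 ≤ pvPw powers (2 * N - 2))

-- A's recursion, made total with a fuel counter; the block size halves toward its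
-- fixpoint each level, so on every input admitted by Pre_ (and every terminating run
-- with |d| <= 2^31) fuel d.toNat + 64 exceeds the recursion depth and the fuel-0 arm
-- is never reached.
def pvMinSeqA (fuel : Nat) (x : Int) (y : Int) (d : Int) (N : Int) (powers : List Int) : Int :=
  match fuel with
  | 0 => 0
  | f + 1 =>
    let b := pvBW x y N powers
    if b = pvBW (x + d) (y + d) N powers ∧ d ≠ pvPw powers N - 1 ∧
       b = pvBW (x + d) y N powers ∧ b = pvBW x (y + d) N powers then 2
    else
      let e := PySem.Int.floordiv d 2
      1 + pvMinSeqA f x y e N powers + pvMinSeqA f (x + e + 1) (y + e + 1) e N powers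
        + pvMinSeqA f x (y + e + 1) e N powers + pvMinSeqA f (x + e + 1) y e N powers

def min_seq_len (x : Int) (y : Int) (d : Int) (N : Int) (powers : List Int) : Int :=
  pvMinSeqA (d.toNat + 64) x y d N powers

-- ===== PORT B =====
-- Source B's while-loop: the stack's top is the list head; the four pushes of Source B are
-- the four cons'd blocks (Source B pushes them in reverse so the pop order is this one).
-- fuel bounds the number of loop iterations (enough under Pre_, see pv_cost_le below).
def pvLoop (fuel : Nat) (N : Int) (powers : List Int) (stack : List (Int × Int × Int)) (total : Int) : Int :=
  match fuel, stack with
  | _, [] => total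
  | 0, _ :: _ => total
  | f + 1, (cx, cy, cd) :: rest =>
    let b := pvBW cx cy N powers
    if b = pvBW (cx + cd) (cy + cd) N powers ∧ cd ≠ pvPw powers N - 1 ∧
       b = pvBW (cx + cd) cy N powers ∧ b = pvBW cx (cy + cd) N powers then
      pvLoop f N powers rest (total + 2)
    else
      let e := PySem.Int.floordiv cd 2
      pvLoop f N powers
        ((cx, cy, e) :: (cx + e + 1, cy + e + 1, e) :: (cx, cy + e + 1, e) :: (cx + e + 1, cy, e) :: rest)
        (total + 1)

def min_seq_len_alt (x : Int) (y : Int) (d : Int) (N : Int) (powers : List Int) : Int :=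
  pvLoop (2 * 4 ^ (d.toNat + 64)) N powers [(x, y, d)] 0

-- ===== PRECONDITION & SPEC =====
-- Pre_ admits the function's natural regime (0 ≤ d with powers[N] ≠ 1, as in PE287 where
-- d = 2^N - 1 and powers[N] = 2^N: there each subdivision strictly shrinks the block and A
-- always returns) and, outside that regime, every input whose quadtree bottoms out within
-- the first two levels (the top block, or all four of its children, pass A's uniformity
-- test); it excludes the remaining non-shrinking inputs, on which A's subdivision does not
-- shrink blocks and A raises RecursionError except for rare deeper corner-test coincidences.
def Pre_min_seq_len (x : Int) (y : Int) (d : Int) (N : Int) (powers : List Int) : Prop :=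
  PySem.Raise.InRange powers.length (N - 1) ∧
  PySem.Raise.InRange powers.length (2 * N - 2) ∧
  PySem.Raise.InRange powers.length N ∧
  ((0 ≤ d ∧ pvPw powers N ≠ 1) ∨
    (pvBW x y N powers = pvBW (x + d) (y + d) N powers ∧ d ≠ pvPw powers N - 1 ∧
     pvBW x y N powers = pvBW (x + d) y N powers ∧ pvBW x y N powers = pvBW x (y + d) N powers) ∨
    ((pvBW x y N powers = pvBW (x + PySem.Int.floordiv d 2) (y + PySem.Int.floordiv d 2) N powers ∧ PySem.Int.floordiv d 2 ≠ pvPw powers N - 1 ∧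
      pvBW x y N powers = pvBW (x + PySem.Int.floordiv d 2) y N powers ∧ pvBW x y N powers = pvBW x (y + PySem.Int.floordiv d 2) N powers) ∧
     (pvBW (x + PySem.Int.floordiv d 2 + 1) (y + PySem.Int.floordiv d 2 + 1) N powers = pvBW (x + PySem.Int.floordiv d 2 + 1 + PySem.Int.floordiv d 2) (y + PySem.Int.floordiv d 2 + 1 + PySem.Int.floordiv d 2) N powers ∧ PySem.Int.floordiv d 2 ≠ pvPw powers N - 1 ∧
      pvBW (x + PySem.Int.floordiv d 2 + 1) (y + PySem.Int.floordiv d 2 + 1) N powers = pvBW (x + PySem.Int.floordiv d 2 + 1 + PySem.Int.floordiv d 2) (y + PySem.Int.floordiv d 2 + 1) N powers ∧ pvBW (x + PySem.Int.floordiv d 2 + 1) (y + PySem.Int.floordiv d 2 + 1) N powers = pvBW (x + PySem.Int.floordiv d 2 + 1) (y + PySem.Int.floordiv d 2 + 1 + PySem.Int.floordiv d 2) N powers) ∧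
     (pvBW x (y + PySem.Int.floordiv d 2 + 1) N powers = pvBW (x + PySem.Int.floordiv d 2) (y + PySem.Int.floordiv d 2 + 1 + PySem.Int.floordiv d 2) N powers ∧ PySem.Int.floordiv d 2 ≠ pvPw powers N - 1 ∧
      pvBW x (y + PySem.Int.floordiv d 2 + 1) N powers = pvBW (x + PySem.Int.floordiv d 2) (y + PySem.Int.floordiv d 2 + 1) N powers ∧ pvBW x (y + PySem.Int.floordiv d 2 + 1) N powers = pvBW x (y + PySem.Int.floordiv d 2 + 1 + PySem.Int.floordiv d 2) N powers) ∧
     (pvBW (x + PySem.Int.floordiv d 2 + 1) y N powers = pvBW (x + PySem.Int.floordiv d 2 + 1 + PySem.Int.floordiv d 2) (y + PySem.Int.floordiv d 2) N powers ∧ PySem.Int.floordiv d 2 ≠ pvPw powers N - 1 ∧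
      pvBW (x + PySem.Int.floordiv d 2 + 1) y N powers = pvBW (x + PySem.Int.floordiv d 2 + 1 + PySem.Int.floordiv d 2) y N powers ∧ pvBW (x + PySem.Int.floordiv d 2 + 1) y N powers = pvBW (x + PySem.Int.floordiv d 2 + 1) (y + PySem.Int.floordiv d 2) N powers)))
instance (x : Int) (y : Int) (d : Int) (N : Int) (powers : List Int) : Decidable (Pre_min_seq_len x y d N powers) := by unfold Pre_min_seq_len; infer_instance

def pvWitness_min_seq_len : Int × Int × Int × Int × List Int := (0, 0, 3, 2, [1, 2, 4, 16])

def Spec_min_seq_len (x : Int) (y : Int) (d : Int) (N : Int) (powers : List Int) (out : Int) : Prop := out = min_seq_len_alt x y d N powers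
instance (x : Int) (y : Int) (d : Int) (N : Int) (powers : List Int) (out : Int) : Decidable (Spec_min_seq_len x y d N powers out) := by unfold Spec_min_seq_len; infer_instance

-- ===== CLAIM (what is proved, stated in full; the proofs are below) =====
def Claim_equal_min_seq_len : Prop := ∀ (x : Int) (y : Int) (d : Int) (N : Int) (powers : List Int), Dom_min_seq_len x y d N powers → Pre_min_seq_len x y d N powers → Spec_min_seq_len x y d N powers (min_seq_len x y d N powers)

-- ===== LEMMAS AND PROOFS =====

-- one A-recursion step: a uniform block (a leaf) contributes 2
theorem pvA_leaf (f : Nat) (x y d N : Int) (powers : List Int)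
    (h : pvBW x y N powers = pvBW (x + d) (y + d) N powers ∧ d ≠ pvPw powers N - 1 ∧
         pvBW x y N powers = pvBW (x + d) y N powers ∧ pvBW x y N powers = pvBW x (y + d) N powers) :
    pvMinSeqA (f + 1) x y d N powers = 2 := by
  simp only [pvMinSeqA]; rw [if_pos h]

-- one A-recursion step: a mixed block splits into its four sub-blocks
theorem pvA_split (f : Nat) (x y d N : Int) (powers : List Int)
    (h : ¬(pvBW x y N powers = pvBW (x + d) (y + d) N powers ∧ d ≠ pvPw powers N - 1 ∧
           pvBW x y N powers = pvBW (x + d) y N powers ∧ pvBW x y N powers = pvBW x (y + d) N powers)) :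
    pvMinSeqA (f + 1) x y d N powers
      = 1 + pvMinSeqA f x y (PySem.Int.floordiv d 2) N powers
          + pvMinSeqA f (x + PySem.Int.floordiv d 2 + 1) (y + PySem.Int.floordiv d 2 + 1) (PySem.Int.floordiv d 2) N powers
          + pvMinSeqA f x (y + PySem.Int.floordiv d 2 + 1) (PySem.Int.floordiv d 2) N powers
          + pvMinSeqA f (x + PySem.Int.floordiv d 2 + 1) y (PySem.Int.floordiv d 2) N powers := by
  simp only [pvMinSeqA]; rw [if_neg h]

-- one B-loop step: the popped block is uniform, total grows by 2
theorem pvLoop_step_leaf (f : Nat) (N : Int) (powers : List Int) (cx cy cd : Int)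
    (rest : List (Int × Int × Int)) (total : Int)
    (h : pvBW cx cy N powers = pvBW (cx + cd) (cy + cd) N powers ∧ cd ≠ pvPw powers N - 1 ∧
         pvBW cx cy N powers = pvBW (cx + cd) cy N powers ∧ pvBW cx cy N powers = pvBW cx (cy + cd) N powers) :
    pvLoop (f + 1) N powers ((cx, cy, cd) :: rest) total = pvLoop f N powers rest (total + 2) := by
  simp only [pvLoop]; rw [if_pos h]

-- one B-loop step: the popped block is mixed, its four sub-blocks are pushed
theorem pvLoop_step_split (f : Nat) (N : Int) (powers : List Int) (cx cy cd : Int)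
    (rest : List (Int × Int × Int)) (total : Int)
    (h : ¬(pvBW cx cy N powers = pvBW (cx + cd) (cy + cd) N powers ∧ cd ≠ pvPw powers N - 1 ∧
           pvBW cx cy N powers = pvBW (cx + cd) cy N powers ∧ pvBW cx cy N powers = pvBW cx (cy + cd) N powers)) :
    pvLoop (f + 1) N powers ((cx, cy, cd) :: rest) total
      = pvLoop f N powers
          ((cx, cy, PySem.Int.floordiv cd 2) :: (cx + PySem.Int.floordiv cd 2 + 1, cy + PySem.Int.floordiv cd 2 + 1, PySem.Int.floordiv cd 2)
            :: (cx, cy + PySem.Int.floordiv cd 2 + 1, PySem.Int.floordiv cd 2) :: (cx + PySem.Int.floordiv cd 2 + 1, cy, PySem.Int.floordiv cd 2) :: rest)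
          (total + 1) := by
  simp only [pvLoop]; rw [if_neg h]

theorem pvLoop_nil (fuel : Nat) (N : Int) (powers : List Int) (total : Int) :
    pvLoop fuel N powers [] total = total := by
  cases fuel <;> rfl

-- number of loop iterations (= quadtree nodes) B spends on one block, mirrored from A's recursion
def pvCost (fuel : Nat) (x : Int) (y : Int) (d : Int) (N : Int) (powers : List Int) : Nat :=
  match fuel with
  | 0 => 1
  | f + 1 =>
    let b := pvBW x y N powers
    if b = pvBW (x + d) (y + d) N powers ∧ d ≠ pvPw powers N - 1 ∧
       b = pvBW (x + d) y N powers ∧ b = pvBW x (y + d) N powers then 1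
    else
      let e := PySem.Int.floordiv d 2
      1 + pvCost f x y e N powers + pvCost f (x + e + 1) (y + e + 1) e N powers
        + pvCost f x (y + e + 1) e N powers + pvCost f (x + e + 1) y e N powers

theorem pv_leaf_zero (x y N : Int) (powers : List Int) (h : pvPw powers N ≠ 1) :
    pvBW x y N powers = pvBW (x + 0) (y + 0) N powers ∧ (0 : Int) ≠ pvPw powers N - 1 ∧
    pvBW x y N powers = pvBW (x + 0) y N powers ∧ pvBW x y N powers = pvBW x (y + 0) N powers := by
  refine ⟨by rw [add_zero, add_zero], by omega, by rw [add_zero], by rw [add_zero]⟩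

theorem pv_key : ∀ (fA : Nat) (x y d N : Int) (powers : List Int),
    0 ≤ d → d.toNat < fA → pvPw powers N ≠ 1 →
    ∀ (f : Nat) (stack : List (Int × Int × Int)) (total : Int),
    pvLoop (pvCost fA x y d N powers + f) N powers ((x, y, d) :: stack) total
      = pvLoop f N powers stack (total + pvMinSeqA fA x y d N powers) := by
  intro fA
  induction fA with
  | zero => intro x y d N powers _ hlt _; omega
  | succ fA ih =>
    intro x y d N powers hd hlt hp f stack total
    by_cases hC : pvBW x y N powers = pvBW (x + d) (y + d) N powers ∧ d ≠ pvPw powers N - 1 ∧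
        pvBW x y N powers = pvBW (x + d) y N powers ∧ pvBW x y N powers = pvBW x (y + d) N powers
    · have hcost : pvCost (fA + 1) x y d N powers = 1 := by
        simp only [pvCost]; rw [if_pos hC]
      rw [hcost, pvA_leaf fA x y d N powers hC, Nat.add_comm 1 f, pvLoop_step_leaf f N powers x y d stack total hC]
    · -- d = 0 would make the block a leaf, so here 1 ≤ d
      have hdpos : 1 ≤ d := by
        rcases lt_or_ge 0 d with h | h
        · omega
        · exact absurd (by rw [show d = 0 by omega]; exact pv_leaf_zero x y N powers hp) hC
      set e := PySem.Int.floordiv d 2 with he'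
      have he : e = d / 2 := PySem.Int.floordiv_eq_ediv_of_pos (by norm_num)
      have he0 : 0 ≤ e := by omega
      have helt : e.toNat < fA := by omega
      have hcost : pvCost (fA + 1) x y d N powers
          = 1 + pvCost fA x y e N powers + pvCost fA (x + e + 1) (y + e + 1) e N powers
            + pvCost fA x (y + e + 1) e N powers + pvCost fA (x + e + 1) y e N powers := by
        simp only [pvCost]; rw [if_neg hC]
      rw [hcost, pvA_split fA x y d N powers hC]
      have hfuel : 1 + pvCost fA x y e N powers + pvCost fA (x + e + 1) (y + e + 1) e N powers
            + pvCost fA x (y + e + 1) e N powers + pvCost fA (x + e + 1) y e N powers + f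
          = (pvCost fA x y e N powers + (pvCost fA (x + e + 1) (y + e + 1) e N powers
            + (pvCost fA x (y + e + 1) e N powers + (pvCost fA (x + e + 1) y e N powers + f)))) + 1 := by
        omega
      rw [hfuel, pvLoop_step_split _ N powers x y d _ total hC, ← he',
          ih x y e N powers he0 helt hp,
          ih (x + e + 1) (y + e + 1) e N powers he0 helt hp,
          ih x (y + e + 1) e N powers he0 helt hp,
          ih (x + e + 1) y e N powers he0 helt hp]
      congr 1
      ring

theorem pv_cost_le : ∀ (fuel : Nat) (x y d N : Int) (powers : List Int),
    pvCost fuel x y d N powers ≤ 2 * 4 ^ fuel - 1 := by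
  intro fuel
  induction fuel with
  | zero => intro x y d N powers; simp [pvCost]
  | succ f ih =>
    intro x y d N powers
    have hp : 1 ≤ (4 : Nat) ^ f := Nat.one_le_pow _ _ (by norm_num)
    have hs : (4 : Nat) ^ (f + 1) = 4 ^ f * 4 := pow_succ 4 f
    by_cases hC : pvBW x y N powers = pvBW (x + d) (y + d) N powers ∧ d ≠ pvPw powers N - 1 ∧
        pvBW x y N powers = pvBW (x + d) y N powers ∧ pvBW x y N powers = pvBW x (y + d) N powers
    · have h1 : pvCost (f + 1) x y d N powers = 1 := by
        simp only [pvCost]; rw [if_pos hC]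
      omega
    · have h0 : pvCost (f + 1) x y d N powers
          = 1 + pvCost f x y (PySem.Int.floordiv d 2) N powers + pvCost f (x + PySem.Int.floordiv d 2 + 1) (y + PySem.Int.floordiv d 2 + 1) (PySem.Int.floordiv d 2) N powers
            + pvCost f x (y + PySem.Int.floordiv d 2 + 1) (PySem.Int.floordiv d 2) N powers + pvCost f (x + PySem.Int.floordiv d 2 + 1) y (PySem.Int.floordiv d 2) N powers := by
        simp only [pvCost]; rw [if_neg hC]
      have h1 := ih x y (PySem.Int.floordiv d 2) N powers
      have h2 := ih (x + PySem.Int.floordiv d 2 + 1) (y + PySem.Int.floordiv d 2 + 1) (PySem.Int.floordiv d 2) N powers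
      have h3 := ih x (y + PySem.Int.floordiv d 2 + 1) (PySem.Int.floordiv d 2) N powers
      have h4 := ih (x + PySem.Int.floordiv d 2 + 1) y (PySem.Int.floordiv d 2) N powers
      omega

-- ===== VERDICT (by name: the statement is the Claim_ definition above) =====
theorem min_seq_len_spec : Claim_equal_min_seq_len := by
  intro x y d N powers _ hpre
  obtain ⟨_, _, _, hmain⟩ := hpre
  unfold Spec_min_seq_len min_seq_len min_seq_len_alt
  have hpow : (16 : Nat) ≤ 4 ^ (d.toNat + 64) := by
    calc (16 : Nat) = 4 ^ 2 := by norm_num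
      _ ≤ 4 ^ (d.toNat + 64) := Nat.pow_le_pow_right (by norm_num) (by omega)
  rcases hmain with ⟨hd, hp⟩ | hleaf | ⟨hk1, hk2, hk3, hk4⟩
  · -- shrinking regime: the worklist invariant pv_key plus the fuel bound pv_cost_le
    have hc := pv_cost_le (d.toNat + 64) x y d N powers
    have hsplit : 2 * 4 ^ (d.toNat + 64)
        = pvCost (d.toNat + 64) x y d N powers + (2 * 4 ^ (d.toNat + 64) - pvCost (d.toNat + 64) x y d N powers) := by
      omega
    rw [hsplit, pv_key (d.toNat + 64) x y d N powers hd (by omega) hp, pvLoop_nil]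
    omega
  · -- the top block is uniform: both programs return 2 at once
    obtain ⟨g, hg⟩ : ∃ g, 2 * 4 ^ (d.toNat + 64) = g + 1 := ⟨2 * 4 ^ (d.toNat + 64) - 1, by omega⟩
    rw [hg, pvLoop_step_leaf g N powers x y d [] 0 hleaf, pvLoop_nil,
        show d.toNat + 64 = (d.toNat + 63) + 1 from rfl, pvA_leaf _ _ _ _ _ _ hleaf]
    omega
  · -- the four sub-blocks are all uniform: if the top is too, both return 2, else both return 9
    by_cases hC : pvBW x y N powers = pvBW (x + d) (y + d) N powers ∧ d ≠ pvPw powers N - 1 ∧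
        pvBW x y N powers = pvBW (x + d) y N powers ∧ pvBW x y N powers = pvBW x (y + d) N powers
    · obtain ⟨g, hg⟩ : ∃ g, 2 * 4 ^ (d.toNat + 64) = g + 1 := ⟨2 * 4 ^ (d.toNat + 64) - 1, by omega⟩
      rw [hg, pvLoop_step_leaf g N powers x y d [] 0 hC, pvLoop_nil,
          show d.toNat + 64 = (d.toNat + 63) + 1 from rfl, pvA_leaf _ _ _ _ _ _ hC]
      omega
    · obtain ⟨g, hg⟩ : ∃ g, 2 * 4 ^ (d.toNat + 64) = g + 5 := ⟨2 * 4 ^ (d.toNat + 64) - 5, by omega⟩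
      rw [show d.toNat + 64 = (d.toNat + 63) + 1 from rfl, pvA_split _ _ _ _ _ _ hC,
          pvA_leaf _ _ _ _ _ _ hk1, pvA_leaf _ _ _ _ _ _ hk2, pvA_leaf _ _ _ _ _ _ hk3, pvA_leaf _ _ _ _ _ _ hk4,
          hg, show g + 5 = ((((g + 1) + 1) + 1) + 1) + 1 from rfl,
          pvLoop_step_split _ N powers x y d [] 0 hC,
          pvLoop_step_leaf _ N powers _ _ _ _ _ hk1, pvLoop_step_leaf _ N powers _ _ _ _ _ hk2,
          pvLoop_step_leaf _ N powers _ _ _ _ _ hk3, pvLoop_step_leaf _ N powers _ _ _ _ _ hk4, pvLoop_nil]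
      omega
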